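-- pv_equiv track=rewrite | github.com/philippeZim/AdventOfCode2023 | Day14/main.py | rollDown
-- ===== SOURCE A (Python) =====
-- def rollDown(m):
--     res = []
--     resArr = [[""] * len(m[0]) for _ in range(len(m))]
--     for i in range(len(m[0])):
--         lp = len(m) - 1
--         for j in range(len(m) - 1, -1, -1):
--             if m[j][i] == "O":
--                 resArr[lp][i] = "O"
--                 lp -= 1
--                 if lp + 1 != j:
--                     resArr[j][i] = "."
--             elif m[j][i] == "#":
--                 resArr[j][i] = "#"
--                 lp = j - 1
--             else:
--                 resArr[j][i] = "."
--     for x in resArr: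
--         res.append("".join(x))
--     return res
-- ===== SOURCE B (Python) =====
-- def rollDown(m):
--     cols = len(m[0])
--     newcols = []
--     for i in range(cols):
--         col = ''.join(m[j][i] for j in range(len(m)))
--         parts = col.split('#')
--         settled = '#'.join('.' * (len(p) - p.count('O')) + 'O' * p.count('O') for p in parts)
--         newcols.append(settled)
--     return [''.join(newcols[i][j] for i in range(cols)) for j in range(len(m))]
-- ===== Notes on version B (the rewrite author's own statement) =====
-- stated objective: simpler
-- what changed: A simulates the falling rocks with a backward row scan per column that maintains a landing pointer and patches a pre-allocated 2D result array cell by cell; B instead extracts each column as a string, splits it on '#', rebuilds every segment directly from its 'O'-count ('.'*(len-k)+'O'*k), rejoins with '#' and transposes the settled columns back into rows.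
import Mathlib
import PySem

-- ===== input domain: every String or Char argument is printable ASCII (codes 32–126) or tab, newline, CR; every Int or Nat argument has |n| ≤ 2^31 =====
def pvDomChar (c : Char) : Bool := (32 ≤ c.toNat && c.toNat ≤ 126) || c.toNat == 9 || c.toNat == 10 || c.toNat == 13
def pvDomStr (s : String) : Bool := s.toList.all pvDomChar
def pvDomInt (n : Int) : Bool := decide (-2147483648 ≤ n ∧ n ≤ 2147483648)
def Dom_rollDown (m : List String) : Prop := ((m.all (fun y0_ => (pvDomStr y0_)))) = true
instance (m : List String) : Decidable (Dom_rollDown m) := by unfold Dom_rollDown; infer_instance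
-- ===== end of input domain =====

-- B replaces A's per-cell landing-pointer simulation by splitting each column on '#' and
-- rebuilding every segment from its 'O'-count (objective: simpler; same asymptotic cost).

-- ===== PORT A =====
-- m[j][i]: two Python indexings. Under Pre_ both are in range; Python's m[j][i] is a 1-character
-- string, modelled as its Char (so the comparisons with "O"/"#" become Char equality); the
-- .getD defaults are never reached inside Pre_.
def pvCharAt (m : List String) (j i : Int) : Char :=
  (PySem.Str.pyGet? (PySem.List.pyGetD m j "") i).getD ' '

-- resArr[r][c] = v  (in-place 2D assignment; r, c are in range at every reachable call inside Pre_)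
def pvSet2 (a : List (List Char)) (r c : Int) (v : Char) : List (List Char) :=
  PySem.List.pySetD a r (PySem.List.pySetD (PySem.List.pyGetD a r []) c v)

-- the body of A's inner 'for j in range(len(m)-1, -1, -1)' loop at column i, state (resArr, lp)
def rollDownStep (m : List String) (i : Int) (st : List (List Char) × Int) (j : Int) :
    List (List Char) × Int :=
  match st with
  | (a, lp) =>
    if pvCharAt m j i = 'O' then
      let a1 := pvSet2 a lp i 'O'
      let lp1 := lp - 1
      (if lp1 + 1 ≠ j then pvSet2 a1 j i '.' else a1, lp1)
    else if pvCharAt m j i = '#' then (pvSet2 a j i '#', j - 1)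
    else (pvSet2 a j i '.', lp)

def rollDown (m : List String) : List String :=
  let w := (PySem.List.pyGetD m 0 "").toList.length          -- len(m[0]); empty m is outside Pre_
  -- resArr = [[""] * len(m[0]) for _ in range(len(m))]; the unwritten-cell placeholder "" is
  -- modelled as ' ' — inside Pre_ every cell is written before the final join reads it
  let resArr0 : List (List Char) := (List.range m.length).map (fun _ => List.replicate w ' ')
  let resArr := (PySem.List.pyRange 0 (w : Int) 1).foldl
      (fun a i =>
        ((PySem.List.pyRange ((m.length : Int) - 1) (-1) (-1)).foldl
          (rollDownStep m i) (a, (m.length : Int) - 1)).1)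
      resArr0
  -- res = []; for x in resArr: res.append("".join(x))
  resArr.foldl (fun res x => res ++ [String.mk x]) []

-- ===== PORT B =====
-- '.' * (len(p) - p.count("O")) + 'O' * p.count("O")
def pvFillSeg (p : List Char) : List Char :=
  List.replicate (p.length - PySem.Chars.count p ['O']) '.'
    ++ List.replicate (PySem.Chars.count p ['O']) 'O'

-- '#'.join(fill(p) for p in col.split('#'))
def pvSettleCol (col : List Char) : List Char :=
  PySem.Chars.join ['#'] ((PySem.Chars.splitOn col ['#']).map pvFillSeg)

def rollDown_alt (m : List String) : List String :=
  let cols := (PySem.List.pyGetD m 0 "").toList.length        -- len(m[0])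
  -- newcols built by the append loop of Source B
  let newcols := (PySem.List.pyRange 0 (cols : Int) 1).foldl
      (fun nc i =>
        nc ++ [pvSettleCol ((PySem.List.pyRange 0 (m.length : Int) 1).map
                 (fun j => pvCharAt m j i))])
      []
  (PySem.List.pyRange 0 (m.length : Int) 1).map
    (fun j => String.mk ((PySem.List.pyRange 0 (cols : Int) 1).map
      (fun i => PySem.List.pyGetD (PySem.List.pyGetD newcols i []) j ' ')))

-- ===== PRECONDITION & SPEC =====
-- Pre_ excludes exactly the inputs where A raises IndexError: the empty grid (m[0]) and grids
-- with a row shorter than the first row (m[j][i]).  B raises IndexError there too.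
def Pre_rollDown (m : List String) : Prop :=
  m ≠ [] ∧ ∀ s ∈ m, (m.headD "").toList.length ≤ s.toList.length
instance (m : List String) : Decidable (Pre_rollDown m) := by unfold Pre_rollDown; infer_instance

def pvWitness_rollDown : List String := ["#.O", "O..", ".O."]

def Spec_rollDown (m : List String) (out : List String) : Prop := out = rollDown_alt m
instance (m : List String) (out : List String) : Decidable (Spec_rollDown m out) := by
  unfold Spec_rollDown; infer_instance

-- ===== CLAIM (what is proved, stated in full; the proofs are below) =====
def Claim_equal_rollDown : Prop :=
  ∀ (m : List String), Dom_rollDown m → Pre_rollDown m → Spec_rollDown m (rollDown m)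

-- ===== LEMMAS AND PROOFS =====

-- proof-side mirror of the per-column data
def pvColOf (m : List String) (i : Int) : List Char :=
  (PySem.List.pyRange 0 (m.length : Int) 1).map (fun j => pvCharAt m j i)

-- 1-dimensional version of A's inner loop body, acting on a single column
def pvColStep (col : List Char) (st : List Char × Int) (j : Int) : List Char × Int :=
  match st with
  | (a, lp) =>
    if PySem.List.pyGetD col j ' ' = 'O' then
      let a1 := PySem.List.pySetD a lp 'O'
      let lp1 := lp - 1
      (if lp1 + 1 ≠ j then PySem.List.pySetD a1 j '.' else a1, lp1)
    else if PySem.List.pyGetD col j ' ' = '#' then (PySem.List.pySetD a j '#', j - 1)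
    else (PySem.List.pySetD a j '.', lp)

-- column i of a 2D array
def pvProj (a : List (List Char)) (i : Nat) : List Char := a.map (fun row => row.getD i ' ')

-- ---- bridges for PySem.Chars.splitOn / count ----
lemma pv_modifyHead_id {α : Type} (l : List α) : List.modifyHead (fun x => x) l = l := by
  cases l <;> rfl

lemma pv_splitOn_cons (c : Char) (rest : List Char) :
    List.splitOn '#' (c :: rest) =
      if c = '#' then [] :: rest.splitOn '#' else (rest.splitOn '#').modifyHead (c :: ·) := by
  simp only [List.splitOn, List.splitOnP_cons]
  by_cases h : c = '#' <;> simp [h]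

lemma pv_splitOn_go (l : List Char) : ∀ (cur : List Char) (acc2 : List (List Char)) (fuel : Nat),
    l.length < fuel →
    PySem.Chars.splitOn.go ['#'] fuel l cur acc2 =
      acc2.reverse ++ (l.splitOn '#').modifyHead (cur.reverse ++ ·) := by
  induction l with
  | nil =>
    intro cur acc2 fuel h
    cases fuel with
    | zero => omega
    | succ f => simp [PySem.Chars.splitOn.go, List.splitOn_nil]
  | cons c rest ih =>
    intro cur acc2 fuel h
    cases fuel with
    | zero => omega
    | succ f =>
      rw [pv_splitOn_cons]
      by_cases hc : c = '#'
      · subst hc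
        have : (['#'].isPrefixOf ('#' :: rest)) = true := by simp [List.isPrefixOf]
        simp only [PySem.Chars.splitOn.go, this, if_true, List.length_cons, List.length_nil,
          List.drop_succ_cons, List.drop_zero]
        rw [ih [] (cur.reverse :: acc2) f (by simpa using Nat.lt_of_succ_lt_succ h)]
        simp [pv_modifyHead_id]
      · have hp : (['#'].isPrefixOf (c :: rest)) = false := by
          simpa [List.isPrefixOf] using Ne.symm hc
        simp only [PySem.Chars.splitOn.go, hp, Bool.false_eq_true, if_false]
        rw [ih (c :: cur) acc2 f (by simpa using Nat.lt_of_succ_lt_succ h), if_neg hc,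
          List.modifyHead_modifyHead]
        congr 2
        funext x
        simp


lemma pv_splitOn_eq (s : List Char) : PySem.Chars.splitOn s ['#'] = s.splitOn '#' := by
  rw [PySem.Chars.splitOn, pv_splitOn_go s [] [] (s.length + 1) (by omega)]
  simp [pv_modifyHead_id]

lemma pv_count_go (l : List Char) : ∀ (acc fuel : Nat), l.length ≤ fuel →
    PySem.Chars.count.go ['O'] fuel l acc = acc + l.count 'O' := by
  induction l with
  | nil =>
    intro acc fuel _
    cases fuel <;> simp [PySem.Chars.count.go]
  | cons c rest ih =>
    intro acc fuel h
    cases fuel with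
    | zero => simp at h
    | succ f =>
      by_cases hc : c = 'O'
      · subst hc
        have hp : (['O'].isPrefixOf ('O' :: rest)) = true := by simp [List.isPrefixOf]
        simp only [PySem.Chars.count.go, hp, if_true, List.length_cons, List.length_nil,
          List.drop_succ_cons, List.drop_zero]
        rw [ih (acc + 1) f (by simpa using h)]
        simp [List.count_cons]
        omega
      · have hp : (['O'].isPrefixOf (c :: rest)) = false := by
          simpa [List.isPrefixOf] using Ne.symm hc
        simp only [PySem.Chars.count.go, hp, Bool.false_eq_true, if_false]
        rw [ih acc f (by simpa using h)]
        simp [List.count_cons, hc]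

lemma pv_count_eq (s : List Char) : PySem.Chars.count s ['O'] = s.count 'O' := by
  rw [PySem.Chars.count]
  simp only [List.isEmpty_cons, Bool.false_eq_true, if_false]
  rw [pv_count_go s 0 s.length le_rfl]
  omega

lemma pv_splitOn_no_hash (c : List Char) (h : '#' ∉ c) : c.splitOn '#' = [c] := by
  induction c with
  | nil => simp [List.splitOn_nil]
  | cons x xs ih =>
    rw [pv_splitOn_cons]
    have hx : x ≠ '#' := fun hc => h (hc ▸ List.mem_cons_self)
    rw [if_neg hx, ih (fun hm => h (List.mem_cons_of_mem _ hm))]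
    rfl

lemma pv_splitOn_ne_nil (c : List Char) : c.splitOn '#' ≠ [] := by
  induction c with
  | nil => simp [List.splitOn_nil]
  | cons x xs ih =>
    rw [pv_splitOn_cons]
    by_cases hx : x = '#'
    · simp [hx]
    · rw [if_neg hx]
      cases hs : xs.splitOn '#' with
      | nil => exact absurd hs ih
      | cons y ys => simp

lemma pv_splitOn_last (pre suf : List Char) (h : '#' ∉ suf) :
    (pre ++ '#' :: suf).splitOn '#' = pre.splitOn '#' ++ [suf] := by
  induction pre with
  | nil =>
    simp only [List.nil_append]
    rw [pv_splitOn_cons, if_pos rfl, pv_splitOn_no_hash suf h, List.splitOn_nil]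
    rfl
  | cons x xs ih =>
    simp only [List.cons_append]
    rw [pv_splitOn_cons, pv_splitOn_cons]
    by_cases hx : x = '#'
    · rw [if_pos hx, if_pos hx, ih]
      rfl
    · rw [if_neg hx, if_neg hx, ih]
      cases hs : xs.splitOn '#' with
      | nil => exact absurd hs (pv_splitOn_ne_nil xs)
      | cons y ys => simp

lemma pv_join_last (A : List (List Char)) (b : List Char) (h : A ≠ []) :
    PySem.Chars.join ['#'] (A ++ [b]) = PySem.Chars.join ['#'] A ++ '#' :: b := by
  induction A with
  | nil => exact absurd rfl h
  | cons a A' ih =>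
    cases A' with
    | nil =>
      rw [List.cons_append, List.nil_append, PySem.Chars.join_cons_cons, PySem.Chars.join_singleton,
        PySem.Chars.join_singleton]
      simp
    | cons x xs =>
      have h1 := ih (by simp)
      rw [List.cons_append] at h1
      show PySem.Chars.join ['#'] (a :: (x :: (xs ++ [b]))) = _
      rw [PySem.Chars.join_cons_cons, h1, PySem.Chars.join_cons_cons]
      simp

lemma pv_settle_no_hash (c : List Char) (h : '#' ∉ c) : pvSettleCol c = pvFillSeg c := by
  rw [pvSettleCol, pv_splitOn_eq, pv_splitOn_no_hash c h]
  simp [PySem.Chars.join, List.intercalate]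

lemma pv_settle_last (pre suf : List Char) (h : '#' ∉ suf) :
    pvSettleCol (pre ++ '#' :: suf) = pvSettleCol pre ++ '#' :: pvFillSeg suf := by
  rw [pvSettleCol, pv_splitOn_eq, pv_splitOn_last pre suf h, List.map_append]
  rw [pvSettleCol, pv_splitOn_eq]
  simp only [List.map_cons, List.map_nil]
  exact pv_join_last _ _ (by simp [pv_splitOn_ne_nil])

lemma pv_fillSeg_length (p : List Char) : (pvFillSeg p).length = p.length := by
  have := List.count_le_length (l := p) (a := 'O')
  simp [pvFillSeg, pv_count_eq]
  omega

-- ---- getD / pySetD toolbox ----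
lemma pv_getD_pySetD (xs : List Char) (r : Int) (x : Nat) (v : Char)
    (hr : 0 ≤ r) (hrl : r < (xs.length : Int)) (hx : x < xs.length) :
    (PySem.List.pySetD xs r v).getD x ' ' = if (x : Int) = r then v else xs.getD x ' ' := by
  rw [PySem.List.pySetD_of_nonneg _ _ hr]
  have hrt : r.toNat < xs.length := by omega
  by_cases hxr : (x : Int) = r
  · have hx2 : r.toNat = x := by omega
    simp [List.getD, List.getElem?_set, hx2, hx, hxr]
  · have hx2 : r.toNat ≠ x := by omega
    simp [List.getD, List.getElem?_set, hx2, hxr]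

lemma pv_colStep_fold_len (col : List Char) :
    ∀ (js : List Int) (a : List Char) (lp : Int),
      ((js.foldl (pvColStep col) (a, lp)).1).length = a.length := by
  intro js
  induction js with
  | nil => intro a lp; rfl
  | cons j js ih =>
    intro a lp
    rw [List.foldl_cons]
    simp only [pvColStep]
    split_ifs <;> rw [ih] <;> simp [PySem.List.length_pySetD]

-- ---- the hash-free segment, pointwise ----
lemma pv_eq_of_getD (xs ys : List Char) (hl : xs.length = ys.length)
    (h : ∀ x : Nat, x < xs.length → xs.getD x ' ' = ys.getD x ' ') : xs = ys := by
  apply List.ext_getElem hl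
  intro n h1 h2
  have hn := h n h1
  rwa [List.getD_eq_getElem _ _ h1, List.getD_eq_getElem _ _ h2] at hn

lemma pv_seg (col : List Char) (t : Nat) :
    ∀ (d : Nat) (a : List Char) (lp : Int),
      a.length = col.length → t + d ≤ col.length →
      ((t : Int) + d) - 1 ≤ lp → lp < (col.length : Int) →
      (∀ x : Nat, t ≤ x → x < t + d → col.getD x ' ' ≠ '#') →
      ((PySem.List.pyRange (((t : Int) + d) - 1) ((t : Int) - 1) (-1)).foldl
          (pvColStep col) (a, lp)).2 = lp - (((col.drop t).take d).count 'O' : Int) ∧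
      ((PySem.List.pyRange (((t : Int) + d) - 1) ((t : Int) - 1) (-1)).foldl
          (pvColStep col) (a, lp)).1.length = a.length ∧
      (∀ x : Nat, x < a.length →
        ((PySem.List.pyRange (((t : Int) + d) - 1) ((t : Int) - 1) (-1)).foldl
            (pvColStep col) (a, lp)).1.getD x ' ' =
          if lp - (((col.drop t).take d).count 'O' : Int) < (x : Int) ∧ (x : Int) ≤ lp then 'O'
          else if t ≤ x ∧ x < t + d then '.'
          else a.getD x ' ') := by
  intro d
  induction d with
  | zero =>
    intro a lp hlen htd hlp hlpn hfree
    rw [PySem.List.pyRange_neg_one_eq_nil (by omega)]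
    simp only [List.foldl_nil, List.take_zero, List.count_nil, Nat.cast_zero]
    refine ⟨by simp, by simp, ?_⟩
    intro x hx
    rw [if_neg (by omega), if_neg (by omega)]
  | succ d ih =>
    intro a lp hlen htd hlp hlpn hfree
    have he1 : ((t : Int) + ((d : Nat) + 1 : Nat)) - 1 = (t : Int) + (d : Int) := by push_cast; ring
    rw [he1, PySem.List.pyRange_neg_one_cons (by omega), List.foldl_cons]
    have hrd : PySem.List.pyGetD col ((t : Int) + (d : Int)) ' ' = col.getD (t + d) ' ' := by
      rw [show (t : Int) + (d : Int) = ((t + d : Nat) : Int) by push_cast; ring,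
        PySem.List.pyGetD_natCast]
    have htdlen : t + d < col.length := by omega
    have hgetc : col.getD (t + d) ' ' = col[t + d] := List.getD_eq_getElem _ _ htdlen
    have hktake : (col.drop t).take (d + 1) = (col.drop t).take d ++ [col[t + d]] := by
      rw [List.take_add_one]
      congr 1
      rw [List.getElem?_drop]
      simp [List.getElem?_eq_getElem (show t + d < col.length by omega)]
    by_cases hO : col.getD (t + d) ' ' = 'O'
    · have hcolO : col[t + d] = 'O' := by rw [← hgetc]; exact hO
      have hk : ((((col.drop t).take (d + 1)).count 'O' : Nat) : Int)
          = (((col.drop t).take d).count 'O' : Int) + 1 := by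
        rw [hktake]
        simp [List.count_append, hcolO]
      by_cases hmv : lp - 1 + 1 ≠ (t : Int) + (d : Int)
      · have hstep : pvColStep col (a, lp) ((t : Int) + (d : Int)) =
            (PySem.List.pySetD (PySem.List.pySetD a lp 'O') ((t : Int) + (d : Int)) '.', lp - 1) := by
          simp only [pvColStep, hrd]
          rw [if_pos hO, if_pos hmv]
        rw [hstep]
        obtain ⟨ih2, ihlen, ihpt⟩ := ih
          (PySem.List.pySetD (PySem.List.pySetD a lp 'O') ((t : Int) + (d : Int)) '.') (lp - 1)
          (by simp [PySem.List.length_pySetD, hlen]) (by omega) (by omega) (by omega)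
          (fun x h1 h2 => hfree x h1 (by omega))
        refine ⟨by rw [ih2, hk]; omega, by simp [ihlen, PySem.List.length_pySetD], ?_⟩
        intro x hx
        rw [ihpt x (by simp [PySem.List.length_pySetD, hx])]
        have hxset : (PySem.List.pySetD (PySem.List.pySetD a lp 'O')
              ((t : Int) + (d : Int)) '.').getD x ' '
            = if (x : Int) = (t : Int) + (d : Int) then '.'
              else if (x : Int) = lp then 'O' else a.getD x ' ' := by
          rw [pv_getD_pySetD _ _ _ _ (by omega) (by simp [PySem.List.length_pySetD]; omega)
            (by simp [PySem.List.length_pySetD]; omega)]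
          split
          · rfl
          · rw [pv_getD_pySetD _ _ _ _ (by omega) (by omega) (by omega)]
        rw [hxset, hk]
        split_ifs <;> first | rfl | omega
      · have hstep : pvColStep col (a, lp) ((t : Int) + (d : Int)) =
            (PySem.List.pySetD a lp 'O', lp - 1) := by
          simp only [pvColStep, hrd]
          rw [if_pos hO, if_neg hmv]
        rw [hstep]
        obtain ⟨ih2, ihlen, ihpt⟩ := ih (PySem.List.pySetD a lp 'O') (lp - 1)
          (by simp [PySem.List.length_pySetD, hlen]) (by omega) (by omega) (by omega)
          (fun x h1 h2 => hfree x h1 (by omega))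
        refine ⟨by rw [ih2, hk]; omega, by simp [ihlen, PySem.List.length_pySetD], ?_⟩
        intro x hx
        rw [ihpt x (by simp [PySem.List.length_pySetD, hx])]
        have hxset : (PySem.List.pySetD a lp 'O').getD x ' '
            = if (x : Int) = lp then 'O' else a.getD x ' ' :=
          pv_getD_pySetD _ _ _ _ (by omega) (by omega) hx
        rw [hxset, hk]
        split_ifs <;> first | rfl | omega
    · have hH : ¬ col.getD (t + d) ' ' = '#' := hfree (t + d) (by omega) (by omega)
      have hcolO : col[t + d] ≠ 'O' := by rw [← hgetc]; exact hO
      have hk : ((((col.drop t).take (d + 1)).count 'O' : Nat) : Int)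
          = (((col.drop t).take d).count 'O' : Int) := by
        rw [hktake]
        simp [List.count_append, List.count_singleton, hcolO]
      have hstep : pvColStep col (a, lp) ((t : Int) + (d : Int)) =
          (PySem.List.pySetD a ((t : Int) + (d : Int)) '.', lp) := by
        simp only [pvColStep, hrd]
        rw [if_neg hO, if_neg hH]
      rw [hstep]
      obtain ⟨ih2, ihlen, ihpt⟩ := ih (PySem.List.pySetD a ((t : Int) + (d : Int)) '.') lp
        (by simp [PySem.List.length_pySetD, hlen]) (by omega) (by omega) (by omega)
        (fun x h1 h2 => hfree x h1 (by omega))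
      refine ⟨by rw [ih2, hk], by simp [ihlen, PySem.List.length_pySetD], ?_⟩
      intro x hx
      rw [ihpt x (by simp [PySem.List.length_pySetD, hx])]
      have hxset : (PySem.List.pySetD a ((t : Int) + (d : Int)) '.').getD x ' '
          = if (x : Int) = (t : Int) + (d : Int) then '.' else a.getD x ' ' :=
        pv_getD_pySetD _ _ _ _ (by omega) (by omega) hx
      rw [hxset, hk]
      split_ifs <;> first | rfl | omega

-- ---- the hash-free segment started with lp at its own bottom, as an append equation ----
lemma pv_seg_append (col : List Char) (t d : Nat) (a : List Char)
    (hlen : a.length = col.length) (htd : t + d ≤ col.length)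
    (hfree : ∀ x : Nat, t ≤ x → x < t + d → col.getD x ' ' ≠ '#') :
    ((PySem.List.pyRange (((t : Int) + d) - 1) ((t : Int) - 1) (-1)).foldl
        (pvColStep col) (a, ((t : Int) + d) - 1)).1 =
      a.take t ++ pvFillSeg ((col.drop t).take d) ++ a.drop (t + d) := by
  obtain ⟨-, hlen2, hpt⟩ :=
    pv_seg col t d a (((t : Int) + d) - 1) hlen htd le_rfl (by omega) hfree
  have hseglen : ((col.drop t).take d).length = d := by
    simp [List.length_take, List.length_drop]; omega
  have hkd : ((col.drop t).take d).count 'O' ≤ d := by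
    have := List.count_le_length (a := 'O') (l := (col.drop t).take d)
    omega
  have hfl : (pvFillSeg ((col.drop t).take d)).length = d := by
    rw [pv_fillSeg_length, hseglen]
  apply pv_eq_of_getD
  · rw [hlen2]
    simp [hfl, List.length_take, List.length_drop]
    omega
  · intro x hx
    rw [hlen2] at hx
    rw [hpt x hx]
    have hta : t ≤ a.length := by omega
    have hlt : (a.take t).length = t := by simp; omega
    have hltf : (a.take t ++ pvFillSeg ((col.drop t).take d)).length = t + d := by
      simp [hfl]; omega
    rcases Nat.lt_or_ge x t with hxt | hxt
    · rw [if_neg (by omega), if_neg (by omega)]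
      have h1 : (a.take t ++ pvFillSeg ((col.drop t).take d) ++ a.drop (t + d))[x]?
          = a[x]? := by
        rw [List.getElem?_append_left (by rw [hltf]; omega),
          List.getElem?_append_left (by rw [hlt]; omega)]
        simp [List.getElem?_take, hxt]
      simp only [List.getD]
      rw [h1]
    · rcases Nat.lt_or_ge x (t + d) with hxd | hxd
      · have h1 : (a.take t ++ pvFillSeg ((col.drop t).take d) ++ a.drop (t + d))[x]?
            = (pvFillSeg ((col.drop t).take d))[x - t]? := by
          rw [List.getElem?_append_left (by rw [hltf]; omega),
            List.getElem?_append_right (by rw [hlt]; omega), hlt]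
        have h2 : (pvFillSeg ((col.drop t).take d))[x - t]?
            = if x - t < d - ((col.drop t).take d).count 'O' then some '.' else some 'O' := by
          rw [pvFillSeg]
          rcases Nat.lt_or_ge (x - t) (d - ((col.drop t).take d).count 'O') with hc | hc
          · rw [List.getElem?_append_left (by simp [pv_count_eq, hseglen]; omega)]
            simp [List.getElem?_replicate, pv_count_eq, hseglen, hc]
          · rw [List.getElem?_append_right (by simp [pv_count_eq, hseglen]; omega),
              if_neg (by omega)]
            simp only [List.getElem?_replicate, List.length_replicate, pv_count_eq, hseglen]
            rw [if_pos (by omega)]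
        rcases Nat.lt_or_ge (x - t) (d - ((col.drop t).take d).count 'O') with hc | hc
        · rw [if_neg (by omega), if_pos (by omega)]
          simp only [List.getD]
          rw [h1, h2, if_pos hc]
          rfl
        · rw [if_pos (by omega)]
          simp only [List.getD]
          rw [h1, h2, if_neg (by omega)]
          rfl
      · have h1 : (a.take t ++ pvFillSeg ((col.drop t).take d) ++ a.drop (t + d))[x]?
            = a[x]? := by
          rw [List.getElem?_append_right (by rw [hltf]; omega), hltf, List.getElem?_drop]
          congr 1
          omega
        rw [if_neg (by omega), if_neg (by omega)]
        simp only [List.getD]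
        rw [h1]

-- ---- the whole column ----
lemma pv_pyRange_neg_one_append (a m b : Int) (h1 : b ≤ m) (h2 : m ≤ a) :
    PySem.List.pyRange a b (-1) = PySem.List.pyRange a m (-1) ++ PySem.List.pyRange m b (-1) := by
  rw [PySem.List.pyRange_neg_one_eq_reverse, PySem.List.pyRange_neg_one_eq_reverse,
    PySem.List.pyRange_neg_one_eq_reverse, ← List.reverse_append,
    ← PySem.List.pyRange_one_append (b + 1) (m + 1) (a + 1) (by omega) (by omega)]

lemma pv_main (col : List Char) :
    ∀ (p : Nat) (a : List Char), p ≤ col.length → a.length = col.length →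
      ((PySem.List.pyRange ((p : Int) - 1) (-1) (-1)).foldl (pvColStep col)
          (a, (p : Int) - 1)).1
        = pvSettleCol (col.take p) ++ a.drop p := by
  intro p
  induction p using Nat.strong_induction_on with
  | _ p ih =>
    intro a hp hlen
    by_cases hex : ∃ q, q < p ∧ col.getD q ' ' = '#'
    · obtain ⟨q0, hq0p, hq0⟩ := hex
      have hp1 : 1 ≤ p := by omega
      set q := Nat.findGreatest (fun q => col.getD q ' ' = '#') (p - 1) with hqdef
      have hqh : col.getD q ' ' = '#' :=
        Nat.findGreatest_spec (P := fun q => col.getD q ' ' = '#') (n := p - 1) (m := q0)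
          (by omega) hq0
      have hqle : q ≤ p - 1 := Nat.findGreatest_le _
      have hqp : q < p := by omega
      have hgr : ∀ x : Nat, q < x → x < p → col.getD x ' ' ≠ '#' := by
        intro x h1 h2
        exact Nat.findGreatest_is_greatest (hqdef ▸ h1) (by omega)
      have hql : q < col.length := by omega
      have hsplit : PySem.List.pyRange ((p : Int) - 1) (-1) (-1)
          = PySem.List.pyRange ((p : Int) - 1) (q : Int) (-1)
            ++ ((q : Int) :: PySem.List.pyRange ((q : Int) - 1) (-1) (-1)) := by
        rw [pv_pyRange_neg_one_append ((p : Int) - 1) (q : Int) (-1) (by omega) (by omega)]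
        congr 1
        exact PySem.List.pyRange_neg_one_cons (by omega)
      rw [hsplit, List.foldl_append]
      have hseg := pv_seg_append col (q + 1) (p - 1 - q) a hlen (by omega)
        (fun x h1 h2 => hgr x (by omega) (by omega))
      rw [show (((q + 1 : Nat) : Int) + ((p - 1 - q : Nat) : Int)) - 1 = (p : Int) - 1 by omega,
        show ((q + 1 : Nat) : Int) - 1 = (q : Int) by omega,
        show (q + 1) + (p - 1 - q) = p from by omega] at hseg
      rcases hpair : (PySem.List.pyRange ((p : Int) - 1) (q : Int) (-1)).foldl
          (pvColStep col) (a, (p : Int) - 1) with ⟨a1, lp1⟩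
      rw [hpair] at hseg
      simp only at hseg
      rw [List.foldl_cons]
      have hstep : pvColStep col (a1, lp1) (q : Int)
          = (PySem.List.pySetD a1 (q : Int) '#', (q : Int) - 1) := by
        simp only [pvColStep, PySem.List.pyGetD_natCast]
        rw [if_neg (by rw [hqh]; decide), if_pos hqh]
      rw [hstep]
      have ha1len : a1.length = col.length := by
        rw [hseg]
        simp [pv_fillSeg_length, List.length_take, List.length_drop]
        omega
      rw [ih q hqp (PySem.List.pySetD a1 (q : Int) '#')
        (by omega) (by rw [PySem.List.length_pySetD]; exact ha1len)]
      have hql' : (a.take q).length = q := by simp; omega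
      have haq : a.take (q + 1) = a.take q ++ [a[q]'(by omega)] := by
        rw [List.take_add_one]
        congr 1
        simp [List.getElem?_eq_getElem (show q < a.length by omega)]
      have hdrop : (PySem.List.pySetD a1 (q : Int) '#').drop q
          = '#' :: (pvFillSeg ((col.drop (q + 1)).take (p - 1 - q)) ++ a.drop p) := by
        rw [PySem.List.pySetD_of_nonneg _ _ (by omega), Int.toNat_natCast,
          List.drop_set, if_neg (by omega), Nat.sub_self]
        rw [hseg, List.append_assoc, haq, List.append_assoc, List.drop_left' hql']
        rfl
      rw [hdrop]
      have hcolq : col[q] = '#' := by rw [← List.getD_eq_getElem col ' ' hql]; exact hqh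
      have hdecomp : col.take p = col.take q ++ '#' :: (col.drop (q + 1)).take (p - 1 - q) := by
        conv_lhs => rw [show p = q + (p - q) from by omega]
        rw [List.take_add]
        congr 1
        rw [List.drop_eq_getElem_cons hql, show p - q = (p - 1 - q) + 1 from by omega,
          List.take_succ_cons, hcolq]
      have hnosuf : '#' ∉ (col.drop (q + 1)).take (p - 1 - q) := by
        intro hmem
        obtain ⟨j, hj, hje⟩ := List.getElem_of_mem hmem
        have h1 : ((col.drop (q + 1)).take (p - 1 - q))[j]? = some '#' := by
          rw [List.getElem?_eq_getElem hj, hje]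
        rw [List.getElem?_take] at h1
        have hjp : j < p - 1 - q := by
          by_contra hcon
          rw [if_neg hcon] at h1
          simp at h1
        rw [if_pos hjp, List.getElem?_drop] at h1
        exact hgr (q + 1 + j) (by omega) (by omega) (by simp [List.getD, h1])
      rw [hdecomp, pv_settle_last _ _ hnosuf]
      simp
    · push_neg at hex
      have hnot : '#' ∉ col.take p := by
        intro hmem
        obtain ⟨j, hj, hje⟩ := List.getElem_of_mem hmem
        have hjp : j < p := by
          have := hj
          simp [List.length_take] at this
          omega
        have hjl : j < col.length := by omega
        rw [List.getElem_take] at hje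
        exact hex j hjp (by rw [List.getD_eq_getElem col ' ' hjl, hje])
      have hseg := pv_seg_append col 0 p a hlen (by omega)
        (fun x h1 h2 => hex x (by omega))
      rw [show (((0 : Nat) : Int) + (p : Int)) - 1 = (p : Int) - 1 by omega,
        show ((0 : Nat) : Int) - 1 = (-1 : Int) by omega] at hseg
      rw [hseg, pv_settle_no_hash _ hnot]
      simp

-- ---- 2D inner loop = 1D loop on the projected column ----
lemma pv_settle_length (col : List Char) : (pvSettleCol col).length = col.length := by
  have hmain := pv_main col col.length (List.replicate col.length ' ') le_rfl (by simp)
  have hl := pv_colStep_fold_len col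
    (PySem.List.pyRange ((col.length : Int) - 1) (-1) (-1))
    (List.replicate col.length ' ') ((col.length : Int) - 1)
  rw [hmain] at hl
  simpa using hl

lemma pv_proj_set2 (a2 : List (List Char)) (w : Nat) (r : Int) (i : Nat) (v : Char)
    (hw : ∀ row ∈ a2, row.length = w) (hi : i < w)
    (h0 : 0 ≤ r) (hr : r < (a2.length : Int)) :
    (pvSet2 a2 r (i : Int) v).length = a2.length ∧
    (∀ row ∈ pvSet2 a2 r (i : Int) v, row.length = w) ∧
    pvProj (pvSet2 a2 r (i : Int) v) i = PySem.List.pySetD (pvProj a2 i) r v ∧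
    (∀ i' : Nat, i' ≠ i → pvProj (pvSet2 a2 r (i : Int) v) i' = pvProj a2 i') := by
  have hrt : r.toNat < a2.length := by omega
  have hrowlen : (a2[r.toNat]).length = w := hw _ (List.getElem_mem hrt)
  have hset2 : pvSet2 a2 r (i : Int) v = a2.set r.toNat ((a2[r.toNat]).set i v) := by
    rw [pvSet2, PySem.List.pyGetD_eq_getElem a2 [] h0 hr,
      PySem.List.pySetD_of_nonneg _ _ h0,
      PySem.List.pySetD_of_nonneg _ _ (by exact_mod_cast Int.natCast_nonneg i),
      Int.toNat_natCast]
  rw [hset2]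
  refine ⟨by simp, ?_, ?_, ?_⟩
  · intro row hrow
    rcases List.mem_or_eq_of_mem_set hrow with hm | he
    · exact hw _ hm
    · rw [he, List.length_set]
      exact hrowlen
  · show (a2.set r.toNat ((a2[r.toNat]).set i v)).map (fun row => row.getD i ' ')
        = PySem.List.pySetD (a2.map (fun row => row.getD i ' ')) r v
    rw [List.map_set, PySem.List.pySetD_of_nonneg _ _ h0]
    congr 1
    rw [List.getD_eq_getElem _ _ (by rw [List.length_set, hrowlen]; exact hi)]
    simp [List.getElem_set]
  · intro i' hni
    show (a2.set r.toNat ((a2[r.toNat]).set i v)).map (fun row => row.getD i' ' ')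
        = a2.map (fun row => row.getD i' ' ')
    rw [List.map_set]
    have hvv : ((a2[r.toNat]).set i v).getD i' ' ' = (a2[r.toNat]).getD i' ' ' := by
      have hii : i ≠ i' := fun h => hni h.symm
      simp [List.getD, List.getElem?_set, hii]
    rw [hvv, show (a2[r.toNat]).getD i' ' '
        = (a2.map (fun row => row.getD i' ' '))[r.toNat]'(by simpa using hrt) from by
          rw [List.getElem_map]]
    exact List.set_getElem_self (by simpa using hrt)

lemma pv_twoD (m : List String) (w : Nat) (i : Nat) (hi : i < w) :
    ∀ (q : Nat) (a2 : List (List Char)) (lp : Int),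
      (∀ row ∈ a2, row.length = w) → a2.length = m.length → q ≤ a2.length →
      (q : Int) - 1 ≤ lp → lp < (a2.length : Int) →
      ((PySem.List.pyRange ((q : Int) - 1) (-1) (-1)).foldl
          (rollDownStep m (i : Int)) (a2, lp)).1.length = a2.length ∧
      (∀ row ∈ ((PySem.List.pyRange ((q : Int) - 1) (-1) (-1)).foldl
          (rollDownStep m (i : Int)) (a2, lp)).1, row.length = w) ∧
      pvProj ((PySem.List.pyRange ((q : Int) - 1) (-1) (-1)).foldl
          (rollDownStep m (i : Int)) (a2, lp)).1 i
        = ((PySem.List.pyRange ((q : Int) - 1) (-1) (-1)).foldl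
          (pvColStep (pvColOf m (i : Int))) (pvProj a2 i, lp)).1 ∧
      ((PySem.List.pyRange ((q : Int) - 1) (-1) (-1)).foldl
          (rollDownStep m (i : Int)) (a2, lp)).2
        = ((PySem.List.pyRange ((q : Int) - 1) (-1) (-1)).foldl
          (pvColStep (pvColOf m (i : Int))) (pvProj a2 i, lp)).2 ∧
      (∀ i' : Nat, i' ≠ i → pvProj ((PySem.List.pyRange ((q : Int) - 1) (-1) (-1)).foldl
          (rollDownStep m (i : Int)) (a2, lp)).1 i' = pvProj a2 i') := by
  intro q
  induction q with
  | zero =>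
    intro a2 lp hw2 hml hq hlp1 hlp2
    rw [show ((0 : Nat) : Int) - 1 = (-1 : Int) by omega,
      PySem.List.pyRange_neg_one_eq_nil (by omega)]
    simp only [List.foldl_nil]
    exact ⟨by trivial, hw2, by trivial, by trivial, fun _ _ => by trivial⟩
  | succ q ihq =>
    intro a2 lp hw2 hml hq hlp1 hlp2
    rw [show ((q + 1 : Nat) : Int) - 1 = (q : Int) by omega,
      PySem.List.pyRange_neg_one_cons (by omega), List.foldl_cons, List.foldl_cons]
    have hqm : q < m.length := by omega
    have hqa : q < a2.length := by omega
    have hread : PySem.List.pyGetD (pvColOf m (i : Int)) (q : Int) ' '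
        = pvCharAt m (q : Int) (i : Int) := by
      rw [pvColOf, PySem.List.pyGetD_map_pyRange_of_nonneg _ _ _ _ (by omega)
        (by exact_mod_cast hqm)]
    by_cases hO : pvCharAt m (q : Int) (i : Int) = 'O'
    · by_cases hmv : lp - 1 + 1 ≠ (q : Int)
      · have hstep2 : rollDownStep m (i : Int) (a2, lp) (q : Int)
            = (pvSet2 (pvSet2 a2 lp (i : Int) 'O') (q : Int) (i : Int) '.', lp - 1) := by
          simp only [rollDownStep]
          rw [if_pos hO, if_pos hmv]
        have hstep1 : pvColStep (pvColOf m (i : Int)) (pvProj a2 i, lp) (q : Int)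
            = (PySem.List.pySetD (PySem.List.pySetD (pvProj a2 i) lp 'O') (q : Int) '.',
               lp - 1) := by
          simp only [pvColStep, hread]
          rw [if_pos hO, if_pos hmv]
        rw [hstep2, hstep1]
        obtain ⟨hp1, hp2, hp3, hp4⟩ := pv_proj_set2 a2 w lp i 'O' hw2 hi (by omega) (by omega)
        obtain ⟨hq1, hq2, hq3, hq4⟩ := pv_proj_set2 (pvSet2 a2 lp (i : Int) 'O') w (q : Int) i '.'
          hp2 hi (by omega) (by rw [hp1]; exact_mod_cast hqa)
        obtain ⟨c1, c2, c3, c4, c5⟩ := ihq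
          (pvSet2 (pvSet2 a2 lp (i : Int) 'O') (q : Int) (i : Int) '.') (lp - 1)
          hq2 (by rw [hq1, hp1, hml]) (by rw [hq1, hp1]; omega) (by omega)
          (by rw [hq1, hp1]; omega)
        refine ⟨by rw [c1, hq1, hp1], c2, ?_, ?_, ?_⟩
        · rw [c3, hq3, hp3]
        · rw [c4, hq3, hp3]
        · intro i' hni
          rw [c5 i' hni, hq4 i' hni, hp4 i' hni]
      · have hstep2 : rollDownStep m (i : Int) (a2, lp) (q : Int)
            = (pvSet2 a2 lp (i : Int) 'O', lp - 1) := by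
          simp only [rollDownStep]
          rw [if_pos hO, if_neg hmv]
        have hstep1 : pvColStep (pvColOf m (i : Int)) (pvProj a2 i, lp) (q : Int)
            = (PySem.List.pySetD (pvProj a2 i) lp 'O', lp - 1) := by
          simp only [pvColStep, hread]
          rw [if_pos hO, if_neg hmv]
        rw [hstep2, hstep1]
        obtain ⟨hp1, hp2, hp3, hp4⟩ := pv_proj_set2 a2 w lp i 'O' hw2 hi (by omega) (by omega)
        obtain ⟨c1, c2, c3, c4, c5⟩ := ihq (pvSet2 a2 lp (i : Int) 'O') (lp - 1)
          hp2 (by rw [hp1, hml]) (by rw [hp1]; omega) (by omega) (by rw [hp1]; omega)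
        refine ⟨by rw [c1, hp1], c2, ?_, ?_, ?_⟩
        · rw [c3, hp3]
        · rw [c4, hp3]
        · intro i' hni
          rw [c5 i' hni, hp4 i' hni]
    · by_cases hH : pvCharAt m (q : Int) (i : Int) = '#'
      · have hstep2 : rollDownStep m (i : Int) (a2, lp) (q : Int)
            = (pvSet2 a2 (q : Int) (i : Int) '#', (q : Int) - 1) := by
          simp only [rollDownStep]
          rw [if_neg hO, if_pos hH]
        have hstep1 : pvColStep (pvColOf m (i : Int)) (pvProj a2 i, lp) (q : Int)
            = (PySem.List.pySetD (pvProj a2 i) (q : Int) '#', (q : Int) - 1) := by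
          simp only [pvColStep, hread]
          rw [if_neg hO, if_pos hH]
        rw [hstep2, hstep1]
        obtain ⟨hp1, hp2, hp3, hp4⟩ := pv_proj_set2 a2 w (q : Int) i '#' hw2 hi (by omega)
          (by exact_mod_cast hqa)
        obtain ⟨c1, c2, c3, c4, c5⟩ := ihq (pvSet2 a2 (q : Int) (i : Int) '#') ((q : Int) - 1)
          hp2 (by rw [hp1, hml]) (by rw [hp1]; omega) (by omega) (by rw [hp1]; omega)
        refine ⟨by rw [c1, hp1], c2, ?_, ?_, ?_⟩
        · rw [c3, hp3]
        · rw [c4, hp3]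
        · intro i' hni
          rw [c5 i' hni, hp4 i' hni]
      · have hstep2 : rollDownStep m (i : Int) (a2, lp) (q : Int)
            = (pvSet2 a2 (q : Int) (i : Int) '.', lp) := by
          simp only [rollDownStep]
          rw [if_neg hO, if_neg hH]
        have hstep1 : pvColStep (pvColOf m (i : Int)) (pvProj a2 i, lp) (q : Int)
            = (PySem.List.pySetD (pvProj a2 i) (q : Int) '.', lp) := by
          simp only [pvColStep, hread]
          rw [if_neg hO, if_neg hH]
        rw [hstep2, hstep1]
        obtain ⟨hp1, hp2, hp3, hp4⟩ := pv_proj_set2 a2 w (q : Int) i '.' hw2 hi (by omega)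
          (by exact_mod_cast hqa)
        obtain ⟨c1, c2, c3, c4, c5⟩ := ihq (pvSet2 a2 (q : Int) (i : Int) '.') lp
          hp2 (by rw [hp1, hml]) (by rw [hp1]; omega) (by omega) (by rw [hp1]; omega)
        refine ⟨by rw [c1, hp1], c2, ?_, ?_, ?_⟩
        · rw [c3, hp3]
        · rw [c4, hp3]
        · intro i' hni
          rw [c5 i' hni, hp4 i' hni]

-- ---- the outer column loop ----
lemma pv_getD_replicate (w i : Nat) : (List.replicate w ' ').getD i ' ' = ' ' := by
  rcases Nat.lt_or_ge i w with h | h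
  · simp [List.getD, List.getElem?_replicate, h]
  · simp [List.getD, List.getElem?_replicate, Nat.not_lt.mpr h]

lemma pv_colOf_length (m : List String) (i : Int) : (pvColOf m i).length = m.length := by
  simp [pvColOf, PySem.List.length_pyRange_one]

set_option maxHeartbeats 1000000 in
lemma pv_outer (m : List String) (w : Nat) (hn : 1 ≤ m.length) :
    ∀ (c : Nat), c ≤ w →
      ((PySem.List.pyRange 0 (c : Int) 1).foldl
          (fun a i =>
            ((PySem.List.pyRange ((m.length : Int) - 1) (-1) (-1)).foldl
              (rollDownStep m i) (a, (m.length : Int) - 1)).1)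
          ((List.range m.length).map (fun _ => List.replicate w ' '))).length = m.length ∧
      (∀ row ∈ (PySem.List.pyRange 0 (c : Int) 1).foldl
          (fun a i =>
            ((PySem.List.pyRange ((m.length : Int) - 1) (-1) (-1)).foldl
              (rollDownStep m i) (a, (m.length : Int) - 1)).1)
          ((List.range m.length).map (fun _ => List.replicate w ' ')), row.length = w) ∧
      (∀ i : Nat, i < c →
        pvProj ((PySem.List.pyRange 0 (c : Int) 1).foldl
          (fun a i =>
            ((PySem.List.pyRange ((m.length : Int) - 1) (-1) (-1)).foldl
              (rollDownStep m i) (a, (m.length : Int) - 1)).1)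
          ((List.range m.length).map (fun _ => List.replicate w ' '))) i
          = pvSettleCol (pvColOf m (i : Int))) ∧
      (∀ i : Nat, c ≤ i →
        pvProj ((PySem.List.pyRange 0 (c : Int) 1).foldl
          (fun a i =>
            ((PySem.List.pyRange ((m.length : Int) - 1) (-1) (-1)).foldl
              (rollDownStep m i) (a, (m.length : Int) - 1)).1)
          ((List.range m.length).map (fun _ => List.replicate w ' '))) i
          = List.replicate m.length ' ') := by
  intro c
  induction c with
  | zero =>
    intro _
    rw [Nat.cast_zero, PySem.List.pyRange_one_eq_nil le_rfl]
    simp only [List.foldl_nil]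
    refine ⟨by simp, ?_, fun i h => absurd h (Nat.not_lt_zero i), ?_⟩
    · intro row hrow
      obtain ⟨_, -, rfl⟩ := List.mem_map.mp hrow
      simp
    · intro i _
      show ((List.range m.length).map fun _ => List.replicate w ' ').map
          (fun row => row.getD i ' ') = List.replicate m.length ' '
      rw [List.map_map]
      have hfun : ((fun row => row.getD i ' ') ∘ fun _ : Nat => List.replicate w ' ')
          = fun _ : Nat => ' ' := by
        funext _
        exact pv_getD_replicate w i
      rw [hfun, List.map_const', List.length_range]
  | succ c ihc =>
    intro hc1
    have hc : c ≤ w := by omega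
    obtain ⟨hlen, hrows, hdone, htodo⟩ := ihc hc
    rw [show ((c + 1 : Nat) : Int) = (c : Int) + 1 by push_cast; ring,
      PySem.List.pyRange_one_succ_right (by omega), List.foldl_append, List.foldl_cons,
      List.foldl_nil]
    obtain ⟨d1, d2, d3, d4, d5⟩ := pv_twoD m w c (by omega) m.length
      ((PySem.List.pyRange 0 (c : Int) 1).foldl
        (fun a i =>
          ((PySem.List.pyRange ((m.length : Int) - 1) (-1) (-1)).foldl
            (rollDownStep m i) (a, (m.length : Int) - 1)).1)
        ((List.range m.length).map (fun _ => List.replicate w ' ')))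
      ((m.length : Int) - 1) hrows hlen (by rw [hlen]) le_rfl (by rw [hlen]; omega)
    have hcol : (pvColOf m (c : Int)).length = m.length := pv_colOf_length m (c : Int)
    have hm := pv_main (pvColOf m (c : Int)) m.length (List.replicate m.length ' ')
      (by rw [hcol]) (by simp [hcol])
    have hms : ((PySem.List.pyRange ((m.length : Int) - 1) (-1) (-1)).foldl
        (pvColStep (pvColOf m (c : Int)))
        (List.replicate m.length ' ', (m.length : Int) - 1)).1
        = pvSettleCol (pvColOf m (c : Int)) := by
      rw [hm, show (pvColOf m (c : Int)).take m.length = pvColOf m (c : Int) from by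
        rw [← hcol]; exact List.take_length]
      simp
    refine ⟨d1.trans hlen, d2, ?_, ?_⟩
    · intro i hi'
      rcases Nat.lt_or_ge i c with hic | hic
      · rw [d5 i (by omega)]
        exact hdone i hic
      · have hieq : i = c := by omega
        subst hieq
        rw [d3, htodo i le_rfl, hms]
    · intro i hi'
      rw [d5 i (by omega)]
      exact htodo i (by omega)

-- ===== VERDICT (by name: the statement is the Claim_ definition above) =====
set_option maxHeartbeats 1000000 in
theorem rollDown_spec : Claim_equal_rollDown := by
  intro m hdom hpre
  have hn : 1 ≤ m.length := by
    rcases m with _ | ⟨r, ms⟩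
    · exact absurd rfl hpre.1
    · simp
  unfold Spec_rollDown rollDown rollDown_alt
  dsimp only
  rw [PySem.List.foldl_append_singleton_eq_map, PySem.List.foldl_append_singleton_eq_map,
    List.nil_append, List.nil_append]
  set w := (PySem.List.pyGetD m 0 "").toList.length with hwdef
  set A := (PySem.List.pyRange 0 (w : Int) 1).foldl
      (fun a i =>
        ((PySem.List.pyRange ((m.length : Int) - 1) (-1) (-1)).foldl
          (rollDownStep m i) (a, (m.length : Int) - 1)).1)
      ((List.range m.length).map (fun _ => List.replicate w ' ')) with hA
  obtain ⟨hlen, hrows, hdone, -⟩ := pv_outer m w hn w le_rfl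
  rw [← hA] at hlen hrows hdone
  apply List.ext_getElem
  · rw [List.length_map, hlen, List.length_map, PySem.List.length_pyRange_one]
    omega
  · intro j h1 h2
    simp only [List.getElem_map, PySem.List.getElem_pyRange_one, zero_add]
    congr 1
    have hj' : j < A.length := by rw [List.length_map] at h1; exact h1
    have hjm : j < m.length := by rw [hlen] at hj'; exact hj'
    apply List.ext_getElem
    · rw [hrows _ (List.getElem_mem _), List.length_map, PySem.List.length_pyRange_one]
      omega
    · intro idx hx1 hx2
      have hidxw : idx < w := by rwa [hrows _ (List.getElem_mem _)] at hx1
      simp only [List.getElem_map, PySem.List.getElem_pyRange_one, zero_add]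
      rw [PySem.List.pyGetD_map_pyRange_of_nonneg _ _ _ _ (by omega) (by exact_mod_cast hidxw)]
      show _ = PySem.List.pyGetD (pvSettleCol (pvColOf m (idx : Int))) (j : Int) ' '
      have hsetlen : j < (pvSettleCol (pvColOf m (idx : Int))).length := by
        rw [pv_settle_length, pv_colOf_length]
        exact hjm
      rw [PySem.List.pyGetD_natCast, List.getD_eq_getElem _ _ hsetlen]
      have hpj : j < (pvProj A idx).length := by
        simp only [pvProj, List.length_map]
        exact hj'
      have e1 : (pvProj A idx)[j]'hpj = (A[j]'hj').getD idx ' ' := by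
        simp only [pvProj]
        rw [List.getElem_map]
      have e2 : (pvProj A idx)[j]'hpj
          = (pvSettleCol (pvColOf m (idx : Int)))[j]'hsetlen := by
        simp only [hdone idx hidxw]
      rw [← e2, e1, List.getD_eq_getElem _ _ hx1]
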